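-- pv_equiv track=rewrite | github.com/boopdotpng/wikibench | scripts/evaluate.py | _heuristic_pick
-- ===== SOURCE A (Python) =====
-- def _heuristic_pick(observation: dict, target_title: str) -> str | None:
--     """Simple heuristic: pick the link whose title is closest to the target.
--
--     Uses exact match first, then longest common substring as a tiebreaker.
--     This is intentionally dumb — it's a baseline, not a real agent.
--     """
--     links = observation.get('links', [])
--     if not links:
--         return None
--
--     target_lower = target_title.lower().replace('_', ' ')
--
--     # Exact match
--     for link in links:
--         if link.replace('_', ' ').lower() == target_lower:
--             return link
--
--     # Score by word overlap with target
--     target_words = set(target_lower.split())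
--
--     def _score(link: str) -> float:
--         link_words = set(link.lower().replace('_', ' ').split())
--         if not target_words:
--             return 0
--         overlap = len(target_words & link_words)
--         return overlap / len(target_words)
--
--     best = max(links, key=_score)
--     if _score(best) > 0:
--         return best
--
--     # Fall back to first link (random-ish)
--     return links[0]
-- ===== SOURCE B (Python) =====
-- def _heuristic_pick(observation: dict, target_title: str) -> str | None:
--     """Single fused pass: first exact match returns immediately; otherwise keep
--     the first link with the strictly greatest word-overlap score; fall back to
--     the first link when every score is zero."""
--     links = observation.get('links', [])
--     if not links:
--         return None
--
--     target_lower = target_title.lower().replace('_', ' ')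
--     target_words = set(target_lower.split())
--
--     best_link, best_score = None, -1
--     for link in links:
--         if link.replace('_', ' ').lower() == target_lower:
--             return link
--         score = len(target_words & set(link.lower().replace('_', ' ').split()))
--         if score > best_score:
--             best_link, best_score = link, score
--     return best_link if best_score > 0 else links[0]
-- ===== Notes on version B (the rewrite author's own statement) =====
-- stated objective: alternative
-- what changed: Fuses A's three traversals (exact-match loop, max() scoring pass, and the redundant _score(best) recomputation) into one loop that keeps a running strictly-greater best, comparing integer overlap counts instead of floats.
import Mathlib
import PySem

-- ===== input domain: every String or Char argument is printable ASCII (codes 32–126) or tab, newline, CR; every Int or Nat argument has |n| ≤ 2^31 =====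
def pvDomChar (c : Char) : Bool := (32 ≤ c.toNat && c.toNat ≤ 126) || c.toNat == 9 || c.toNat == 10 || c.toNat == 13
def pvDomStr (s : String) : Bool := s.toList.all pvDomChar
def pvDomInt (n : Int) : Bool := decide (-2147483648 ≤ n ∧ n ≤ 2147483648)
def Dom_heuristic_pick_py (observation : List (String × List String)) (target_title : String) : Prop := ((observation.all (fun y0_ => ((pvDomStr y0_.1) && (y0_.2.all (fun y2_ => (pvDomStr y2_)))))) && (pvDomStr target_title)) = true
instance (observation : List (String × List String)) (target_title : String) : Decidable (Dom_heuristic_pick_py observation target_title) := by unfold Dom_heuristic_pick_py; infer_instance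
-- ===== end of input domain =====

-- ===== PORT A =====
-- One honest line: B fuses A's three passes over links (exact-match loop, max() pass,
-- recomputed _score(best)) into a single loop with a running strictly-greater best.
-- A's _score returns overlap/len(target_words) as a Python float; every comparison it feeds
-- (max's key comparisons and '> 0') has the SAME fixed positive denominator and integer
-- numerators < 2^31, where IEEE division is order- and zero-exact, so the integer overlap
-- is ported as the exact comparison key ('if not target_words' gives 0 = the overlap there).
def pvScoreA (tw : PySem.Set String) (l : String) : Int :=
  PySem.Set.len (PySem.Set.inter tw (PySem.Set.ofList (PySem.Str.split₀ (PySem.Str.replace (PySem.Str.lower l) "_" " "))))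

-- observation.get('links', []) on the association list: first match, per the dict convention
def pvGetLinks (observation : List (String × List String)) : List String :=
  ((observation.find? (fun kv => kv.1 == "links")).map Prod.snd).getD []

def heuristic_pick_py (observation : List (String × List String)) (target_title : String) : Option String :=
  let links := pvGetLinks observation
  match links with
  | [] => none
  | l0 :: rest =>
    let target_lower := PySem.Str.replace (PySem.Str.lower target_title) "_" " "
    -- 'for link in links: if …: return link'
    match (l0 :: rest).find? (fun link => PySem.Str.lower (PySem.Str.replace link "_" " ") == target_lower) with
    | some link => some link
    | none =>
      let target_words := PySem.Set.ofList (PySem.Str.split₀ target_lower)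
      match PySem.List.max? (l0 :: rest) (pvScoreA target_words) with
      | some best => if pvScoreA target_words best > 0 then some best else some l0
      | none => some l0  -- unreachable: the list is nonempty

-- ===== PORT B =====
def pvScoreB (tw : PySem.Set String) (l : String) : Int :=
  PySem.Set.len (PySem.Set.inter tw (PySem.Set.ofList (PySem.Str.split₀ (PySem.Str.replace (PySem.Str.lower l) "_" " "))))

-- the fused loop of Source B: best_link/best_score accumulator, first exact match returns
def pvGoB (target_lower : String) (tw : PySem.Set String) (l0 : String) :
    List String → Option String → Int → Option String
  | [], best, bestScore => if bestScore > 0 then best else some l0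
  | link :: rest, best, bestScore =>
    if PySem.Str.lower (PySem.Str.replace link "_" " ") == target_lower then some link
    else
      let score := pvScoreB tw link
      if score > bestScore then pvGoB target_lower tw l0 rest (some link) score
      else pvGoB target_lower tw l0 rest best bestScore

def heuristic_pick_py_alt (observation : List (String × List String)) (target_title : String) : Option String :=
  match pvGetLinks observation with
  | [] => none
  | l0 :: rest =>
    let target_lower := PySem.Str.replace (PySem.Str.lower target_title) "_" " "
    let target_words := PySem.Set.ofList (PySem.Str.split₀ target_lower)
    pvGoB target_lower target_words l0 (l0 :: rest) none (-1)

-- ===== PRECONDITION & SPEC =====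
def Spec_heuristic_pick_py (observation : List (String × List String)) (target_title : String) (out : Option String) : Prop := out = heuristic_pick_py_alt observation target_title
instance (observation : List (String × List String)) (target_title : String) (out : Option String) : Decidable (Spec_heuristic_pick_py observation target_title out) := by unfold Spec_heuristic_pick_py; infer_instance

-- ===== CLAIM (what is proved, stated in full; the proofs are below) =====
def Claim_equal_heuristic_pick_py : Prop := ∀ (observation : List (String × List String)) (target_title : String), Dom_heuristic_pick_py observation target_title → Spec_heuristic_pick_py observation target_title (heuristic_pick_py observation target_title)

-- ===== LEMMAS AND PROOFS =====

theorem pvScore_nonneg (tw : PySem.Set String) (l : String) : 0 ≤ pvScoreB tw l := by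
  simp [pvScoreB, PySem.Set.len]

theorem pvScoreA_eq_pvScoreB : pvScoreA = pvScoreB := rfl

-- if the exact-match scan finds a link, the fused loop returns exactly that link
theorem pvGoB_of_find?_some (tl : String) (tw : PySem.Set String) (l0 : String)
    (links : List String) (m : String)
    (h : links.find? (fun link => PySem.Str.lower (PySem.Str.replace link "_" " ") == tl) = some m) :
    ∀ (best : Option String) (bs : Int), pvGoB tl tw l0 links best bs = some m := by
  induction links with
  | nil => simp at h
  | cons l rest ih =>
    intro best bs
    by_cases hl : (PySem.Str.lower (PySem.Str.replace l "_" " ") == tl) = true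
    · simp only [List.find?_cons, hl] at h
      simp only [pvGoB, hl]
      simpa using h
    · rw [Bool.not_eq_true] at hl
      simp only [List.find?_cons, hl] at h
      simp [pvGoB, hl]
      by_cases hs : pvScoreB tw l > bs <;> simp [hs, ih h]

-- the accumulator step of Python's max(…, key=…) fold, named so both sides share it
def pvStep (tw : PySem.Set String) (acc : Option String) (x : String) : Option String :=
  match acc with
  | none => some x
  | some m => if pvScoreB tw m < pvScoreB tw x then some x else some m

theorem pvMax_eq_foldl (tw : PySem.Set String) (links : List String) :
    PySem.List.max? links (pvScoreB tw) = links.foldl (pvStep tw) none := by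
  simp only [PySem.List.max?]
  congr 1
  funext acc x
  cases acc <;> rfl

-- with no exact match on the tail, the fused loop from accumulator (some b, score b)
-- computes A's "max then threshold" answer
theorem pvGoB_no_match (tl : String) (tw : PySem.Set String) (l0 : String)
    (links : List String)
    (h : ∀ l ∈ links, (PySem.Str.lower (PySem.Str.replace l "_" " ") == tl) = false) :
    ∀ (b : String),
      pvGoB tl tw l0 links (some b) (pvScoreB tw b) =
        (match links.foldl (pvStep tw) (some b) with
         | some m => if pvScoreB tw m > 0 then some m else some l0
         | none => some l0) := by
  induction links with
  | nil => intro b; simp [pvGoB]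
  | cons l rest ih =>
    intro b
    have hl := h l (by simp)
    have hrest : ∀ l' ∈ rest, (PySem.Str.lower (PySem.Str.replace l' "_" " ") == tl) = false :=
      fun l' hm => h l' (by simp [hm])
    by_cases hs : pvScoreB tw b < pvScoreB tw l
    · simpa [pvGoB, pvStep, hl, hs] using ih hrest l
    · simpa [pvGoB, pvStep, hl, hs] using ih hrest b

-- ===== VERDICT (by name: the statement is the Claim_ definition above) =====
theorem heuristic_pick_py_spec : Claim_equal_heuristic_pick_py := by
  intro observation target_title _
  unfold Spec_heuristic_pick_py
  simp only [heuristic_pick_py, heuristic_pick_py_alt, pvScoreA_eq_pvScoreB]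
  generalize pvGetLinks observation = links
  cases links with
  | nil => rfl
  | cons l0 rest =>
    set tl := PySem.Str.replace (PySem.Str.lower target_title) "_" " " with htl
    set tw := PySem.Set.ofList (PySem.Str.split₀ tl) with htw
    cases hf : (l0 :: rest).find? (fun link => PySem.Str.lower (PySem.Str.replace link "_" " ") == tl) with
    | some m =>
      simp only [hf]
      rw [pvGoB_of_find?_some tl tw l0 (l0 :: rest) m hf none (-1)]
    | none =>
      simp only [hf]
      have hnom := List.find?_eq_none.mp hf
      have hl0 : (PySem.Str.lower (PySem.Str.replace l0 "_" " ") == tl) = false := by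
        simpa using hnom l0 (by simp)
      have hrest : ∀ l ∈ rest, (PySem.Str.lower (PySem.Str.replace l "_" " ") == tl) = false :=
        fun l hm => by simpa using hnom l (by simp [hm])
      have hpos : pvScoreB tw l0 > (-1 : Int) :=
        lt_of_lt_of_le (by norm_num) (pvScore_nonneg tw l0)
      have hstep : pvGoB tl tw l0 (l0 :: rest) none (-1) =
          pvGoB tl tw l0 rest (some l0) (pvScoreB tw l0) := by
        simp [pvGoB, hl0, hpos]
      rw [hstep, pvGoB_no_match tl tw l0 rest hrest l0]
      have hmax : PySem.List.max? (l0 :: rest) (pvScoreB tw) =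
          rest.foldl (pvStep tw) (some l0) := by
        rw [pvMax_eq_foldl]
        rfl
      rw [hmax]
      cases hres : rest.foldl (pvStep tw) (some l0) with
      | none => rfl
      | some m => rfl
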